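-- pv_equiv track=rewrite | github.com/ljt019/battleship_environment | src/battleship_grpo/battleship_env.py | _compact_conversation_history
-- ===== SOURCE A (Python) =====
-- from typing import Tuple, List, Dict, Any, Union
--
-- def _compact_conversation_history(messages: List[Dict[str, Any]]) -> List[Dict[str, Any]]:
--     """Remove old board states from conversation, keeping only the most recent one"""
--     compacted_messages = []
--     last_board_message_idx = -1
--
--     # Find the last user message containing a <grid> tag (latest board)
--     for i, msg in enumerate(messages):
--         if msg.get('role') == 'user' and '<grid>' in msg.get('content', ''):
--             last_board_message_idx = i
--
--     # Keep all messages, but replace old board states with just the feedback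
--     for i, msg in enumerate(messages):
--         if msg.get('role') == 'user':
--             content = msg.get('content', '')
--             is_env_state = any(tag in content for tag in ('<grid>', '<state', '<remaining', '<result'))
--             # If this is an old environment state (not the most recent), drop it entirely
--             if is_env_state and i < last_board_message_idx:
--                 continue  # skip stale env message
--             else:
--                 compacted_messages.append(msg)
--         else:
--             compacted_messages.append(msg)
--
--     return compacted_messages
-- ===== SOURCE B (Python) =====
-- def _compact_conversation_history(messages):
--     """Remove old board states from conversation, keeping only the most recent one.
--
--     Single reverse pass: keep everything until the latest board (<grid>) user
--     message is seen, then drop every stale environment-state user message."""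
--     kept_rev = []
--     seen_latest_board = False
--     for msg in reversed(messages):
--         is_user = msg.get('role') == 'user'
--         content = msg.get('content', '')
--         if seen_latest_board and is_user and any(
--                 tag in content for tag in ('<grid>', '<state', '<remaining', '<result')):
--             continue  # stale env-state message, drop it
--         kept_rev.append(msg)
--         seen_latest_board = seen_latest_board or (is_user and '<grid>' in content)
--     kept_rev.reverse()
--     return kept_rev
-- ===== Notes on version B (the rewrite author's own statement) =====
-- stated objective: alternative
-- what changed: Replaced A's two forward passes (first computing the index of the last '<grid>' user message, then re-scanning and dropping earlier env-state user messages) by one reverse pass with a seen-latest-board flag that starts dropping env-state user messages once the latest '<grid>' user message has been passed.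
import Mathlib
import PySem

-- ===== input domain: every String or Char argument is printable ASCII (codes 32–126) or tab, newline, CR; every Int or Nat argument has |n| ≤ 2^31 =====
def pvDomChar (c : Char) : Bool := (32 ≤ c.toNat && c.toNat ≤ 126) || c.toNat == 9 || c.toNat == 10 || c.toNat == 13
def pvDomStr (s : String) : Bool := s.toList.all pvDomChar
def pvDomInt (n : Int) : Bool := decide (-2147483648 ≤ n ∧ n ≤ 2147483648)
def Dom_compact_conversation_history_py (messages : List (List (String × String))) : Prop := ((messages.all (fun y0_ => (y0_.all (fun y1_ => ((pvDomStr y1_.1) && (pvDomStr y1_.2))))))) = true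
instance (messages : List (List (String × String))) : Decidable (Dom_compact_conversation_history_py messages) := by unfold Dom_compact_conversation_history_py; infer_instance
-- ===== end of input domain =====

-- B replaces A's two forward passes (find last '<grid>' index, then re-scan dropping earlier
-- env-state user messages) by ONE reverse pass with a seen-latest-board flag (objective: alternative).

-- ===== PORT A =====
-- msg.get(k, d)  (association list, first match = Python dict lookup)
def pvGet (m : List (String × String)) (k d : String) : String := (PySem.Dict.mk m).getD k d

-- msg.get('role') == 'user'
def pvIsUser (m : List (String × String)) : Bool := pvGet m "role" "" == "user"

-- is_env_state = any(tag in content for tag in ('<grid>', '<state', '<remaining', '<result'))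
def pvIsEnv (m : List (String × String)) : Bool :=
  pvIsUser m && (["<grid>", "<state", "<remaining", "<result"].any
    (fun tag => PySem.Str.isIn tag (pvGet m "content" "")))

-- msg.get('role') == 'user' and '<grid>' in msg.get('content', '')
def pvIsBoard (m : List (String × String)) : Bool :=
  pvIsUser m && PySem.Str.isIn "<grid>" (pvGet m "content" "")

def compact_conversation_history_py (messages : List (List (String × String))) : List (List (String × String)) :=
  -- first loop: index of the last user message containing '<grid>' (-1 if none)
  let last_board_message_idx : Int :=
    (PySem.List.enumerate messages).foldl
      (fun acc p => if pvIsBoard p.2 then p.1 else acc) (-1)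
  -- second loop: keep all messages, dropping stale env-state user messages
  (PySem.List.enumerate messages).foldl
    (fun acc p =>
      if pvIsUser p.2 then
        if pvIsEnv p.2 && decide (p.1 < last_board_message_idx) then acc else acc ++ [p.2]
      else acc ++ [p.2]) []

-- ===== PORT B =====
-- the reverse walk: drop env-state user messages once the latest board has been seen
def pvAltGo : List (List (String × String)) → Bool → List (List (String × String))
  | [], _ => []
  | m :: rest, seen =>
    if seen && pvIsEnv m then pvAltGo rest seen
    else m :: pvAltGo rest (seen || pvIsBoard m)

def compact_conversation_history_py_alt (messages : List (List (String × String))) : List (List (String × String)) :=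
  (pvAltGo messages.reverse false).reverse

-- ===== PRECONDITION & SPEC =====
def Spec_compact_conversation_history_py (messages : List (List (String × String))) (out : List (List (String × String))) : Prop := out = compact_conversation_history_py_alt messages
instance (messages : List (List (String × String))) (out : List (List (String × String))) : Decidable (Spec_compact_conversation_history_py messages out) := by unfold Spec_compact_conversation_history_py; infer_instance

-- ===== CLAIM (what is proved, stated in full; the proofs are below) =====
def Claim_equal_compact_conversation_history_py : Prop := ∀ (messages : List (List (String × String))), Dom_compact_conversation_history_py messages → Spec_compact_conversation_history_py messages (compact_conversation_history_py messages)

-- ===== LEMMAS AND PROOFS =====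

theorem pv_board_env {m : List (String × String)} (h : pvIsBoard m = true) : pvIsEnv m = true := by
  simp only [pvIsBoard, Bool.and_eq_true] at h
  simp [pvIsEnv, h.1, List.any]
  exact Or.inl h.2

theorem pv_enumerate_snoc (xs : List (List (String × String))) (x : List (String × String)) (s : Int) :
    PySem.List.enumerate (xs ++ [x]) s = PySem.List.enumerate xs s ++ [((s + xs.length : Int), x)] := by
  induction xs generalizing s with
  | nil => simp [PySem.List.enumerate_nil, PySem.List.enumerate_cons]
  | cons y ys ih =>
    simp only [List.cons_append, PySem.List.enumerate_cons, ih (s + 1), List.length_cons]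
    have h1 : s + 1 + (ys.length : Int) = s + ((ys.length : Int) + 1) := by ring
    push_cast
    rw [h1]

-- the first loop's accumulator stays below s + length
theorem pv_lastIdx_lt (xs : List (List (String × String))) :
    ∀ (s a : Int), a < s + xs.length →
      (PySem.List.enumerate xs s).foldl (fun acc p => if pvIsBoard p.2 then p.1 else acc) a
        < s + xs.length := by
  induction xs with
  | nil => intro s a h; simpa using h
  | cons y ys ih =>
    intro s a h
    simp only [PySem.List.enumerate_cons, List.foldl_cons, List.length_cons]
    by_cases hb : pvIsBoard y = true
    · simp only [hb, if_true]
      have := ih (s + 1) s (by push_cast; omega)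
      push_cast at this ⊢; omega
    · simp only [hb, if_false]
      have := ih (s + 1) a (by push_cast [List.length_cons] at h ⊢; omega)
      push_cast at this ⊢; omega

-- when every index is below L, the second loop is a plain filter
theorem pv_keep_filter (xs : List (List (String × String))) (L : Int)
    (h : (xs.length : Int) ≤ L) :
    (PySem.List.enumerate xs).foldl
      (fun acc p =>
        if pvIsUser p.2 then
          if pvIsEnv p.2 && decide (p.1 < L) then acc else acc ++ [p.2]
        else acc ++ [p.2]) []
    = xs.filter (fun m => !pvIsEnv m) := by
  induction xs using List.reverseRecOn with
  | nil => simp [PySem.List.enumerate_nil]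
  | append_singleton ys y ih =>
    rw [show PySem.List.enumerate (ys ++ [y]) = PySem.List.enumerate ys ++ [((0 + ys.length : Int), y)] from pv_enumerate_snoc ys y 0]
    rw [List.foldl_append]
    rw [ih (by simp only [List.length_append, List.length_cons, List.length_nil] at h; push_cast at h ⊢; omega)]
    have hidx : ((0 : Int) + ys.length < L) := by
      simp only [List.length_append, List.length_cons, List.length_nil] at h; push_cast at h ⊢; omega
    simp only [List.foldl_cons, List.foldl_nil, List.filter_append, List.filter_cons, List.filter_nil]
    by_cases hu : pvIsUser y = true
    · by_cases he : pvIsEnv y = true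
      · simp [hu, he]
        omega
      · have hu' : pvIsEnv y = false := by simpa using he
        simp [hu, hu']
    · have hu' : pvIsUser y = false := by simpa using hu
      have he : pvIsEnv y = false := by
        simp [pvIsEnv, hu']
      simp [hu', he]

-- once the flag is set, the reverse walk is a plain filter
theorem pv_altGo_true (l : List (List (String × String))) :
    pvAltGo l true = l.filter (fun m => !pvIsEnv m) := by
  induction l with
  | nil => simp [pvAltGo]
  | cons m rest ih =>
    by_cases he : pvIsEnv m = true
    · simp [pvAltGo, he, ih]
    · have he' : pvIsEnv m = false := by simpa using he
      simp [pvAltGo, he', ih]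

theorem pv_main (messages : List (List (String × String))) :
    compact_conversation_history_py messages = compact_conversation_history_py_alt messages := by
  induction messages using List.reverseRecOn with
  | nil => simp [compact_conversation_history_py, compact_conversation_history_py_alt,
      PySem.List.enumerate_nil, pvAltGo]
  | append_singleton ms m ih =>
    have hrev : (ms ++ [m]).reverse = m :: ms.reverse := by simp
    have hLdef : ∀ (zs : List (List (String × String))),
        (PySem.List.enumerate zs).foldl (fun acc p => if pvIsBoard p.2 then p.1 else acc) (-1)
          < (zs.length : Int) := by
      intro zs
      have := pv_lastIdx_lt zs 0 (-1) (by push_cast; omega)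
      simpa using this
    by_cases hb : pvIsBoard m = true
    · -- m is the latest board message: both sides are filter(ms) ++ [m]
      have henv := pv_board_env hb
      have hA : compact_conversation_history_py (ms ++ [m])
          = ms.filter (fun x => !pvIsEnv x) ++ [m] := by
        unfold compact_conversation_history_py
        rw [show PySem.List.enumerate (ms ++ [m]) = PySem.List.enumerate ms ++ [((0 + ms.length : Int), m)] from pv_enumerate_snoc ms m 0]
        simp only [List.foldl_append, List.foldl_cons, List.foldl_nil, hb, if_true]
        have hu : pvIsUser m = true := by
          simp only [pvIsBoard, Bool.and_eq_true] at hb; exact hb.1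
        rw [pv_keep_filter ms ((0:Int) + ms.length) (by push_cast; omega)]
        simp [hu, henv]
      have hB : compact_conversation_history_py_alt (ms ++ [m])
          = ms.filter (fun x => !pvIsEnv x) ++ [m] := by
        unfold compact_conversation_history_py_alt
        rw [hrev]
        simp only [pvAltGo, Bool.false_and, if_false, hb, Bool.or_true, Bool.false_or]
        rw [pv_altGo_true]
        simp [List.filter_reverse]
      rw [hA, hB]
    · -- no new board: both sides append m to the result on ms
      have hb' : pvIsBoard m = false := by simpa using hb
      have hA : compact_conversation_history_py (ms ++ [m])
          = compact_conversation_history_py ms ++ [m] := by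
        unfold compact_conversation_history_py
        rw [show PySem.List.enumerate (ms ++ [m]) = PySem.List.enumerate ms ++ [((0 + ms.length : Int), m)] from pv_enumerate_snoc ms m 0]
        simp only [List.foldl_append, List.foldl_cons, List.foldl_nil, hb', if_false]
        have hlt := hLdef ms
        have hnot : ¬ ((0 : Int) + ms.length <
            (PySem.List.enumerate ms).foldl (fun acc p => if pvIsBoard p.2 then p.1 else acc) (-1)) := by
          omega
        by_cases hu : pvIsUser m = true
        · simp [hu]
          intro _
          omega
        · have hu' : pvIsUser m = false := by simpa using hu
          simp [hu']
      have hB : compact_conversation_history_py_alt (ms ++ [m])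
          = compact_conversation_history_py_alt ms ++ [m] := by
        unfold compact_conversation_history_py_alt
        rw [hrev]
        simp only [pvAltGo, Bool.false_and, if_false, hb', Bool.or_false, Bool.false_or]
        simp
      rw [hA, hB, ih]

-- ===== VERDICT (by name: the statement is the Claim_ definition above) =====
theorem compact_conversation_history_py_spec : Claim_equal_compact_conversation_history_py := by
  intro messages _
  unfold Spec_compact_conversation_history_py
  exact pv_main messages
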